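-- pv_equiv track=rewrite | github.com/sujitkc/line-length | line-length.py | compute_lines
-- ===== SOURCE A (Python) =====
-- def hyphenate(word, length):
--   if(len(word) > length):
--     w = word[:length - 1] + "-"
--     ws = hyphenate(word[length - 1:], length)
--     hwords = [w] + ws
--   else:
--     hwords = [word]
--   return hwords
--
-- def compute_lines(text, max_line_length):
--   words = text.split(" ")
--
--   lines = []
--   curr_line = ""
--   for word in words:
--     if(len(curr_line + word) > max_line_length):
--       l = max_line_length - len(curr_line)
--       w = word[:l - 1] + "-"
--       curr_line += w
--       lines.append(curr_line)
--       curr_line = ""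
--       hwords = hyphenate(word[l - 1:], max_line_length)
--       for hw in hwords[:-1]:
--         lines.append(hw)
--       curr_line = hwords[-1]
--     else:
--       curr_line += (word + " ")
--   if(curr_line != ""):
--     lines.append(curr_line.strip())
--   return lines
-- ===== SOURCE B (Python) =====
-- def compute_lines(text, max_line_length):
--     lines = []
--     curr = ""
--     for word in text.split(" "):
--         if len(curr) + len(word) <= max_line_length:
--             curr += word + " "
--         else:
--             cut = max_line_length - len(curr) - 1
--             lines.append(curr + word[:cut] + "-")
--             rest = word[cut:]
--             while len(rest) > max_line_length:
--                 lines.append(rest[:max_line_length - 1] + "-")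
--                 rest = rest[max_line_length - 1:]
--             curr = rest
--     if curr != "":
--         lines.append(curr.strip())
--     return lines
-- ===== Notes on version B (the rewrite author's own statement) =====
-- stated objective: simpler
-- what changed: The recursive hyphenate helper (which builds a list of pieces that the caller then copies into lines) is removed; B emits each hyphenated chunk directly from one word loop with an inner while-loop slicing max_line_length-1 characters at a time.
-- outside the precondition, e.g. on compute_lines(' ab', 1): A returns [' a-', 'b'], B returns [' a-', 'b']
import Mathlib
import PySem

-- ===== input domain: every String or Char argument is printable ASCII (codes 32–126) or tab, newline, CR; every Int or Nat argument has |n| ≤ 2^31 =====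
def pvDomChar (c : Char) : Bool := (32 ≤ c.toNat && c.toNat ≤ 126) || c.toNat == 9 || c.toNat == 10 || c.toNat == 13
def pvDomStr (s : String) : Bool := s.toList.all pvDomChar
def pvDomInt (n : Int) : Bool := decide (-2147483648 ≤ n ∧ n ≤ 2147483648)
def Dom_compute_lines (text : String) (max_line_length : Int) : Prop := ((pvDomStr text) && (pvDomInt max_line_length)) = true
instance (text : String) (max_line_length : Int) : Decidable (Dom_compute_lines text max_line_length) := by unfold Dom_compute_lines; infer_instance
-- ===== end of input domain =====

-- B replaces A's recursive `hyphenate` helper (build a list of pieces, then copy it into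
-- `lines`) by a single iterative word loop that emits each hyphenated chunk directly with
-- an inner while-loop: same output, a simpler one-pass decomposition (no speed claim).


-- ===== PORT A =====
-- hyphenate(word, length); fuel = an upper bound on the recursion depth (each step drops
-- length-1 ≥ 1 chars when length ≥ 2, so fuel = word.length never runs out inside Pre_).
def pyHyphenate (fuel : Nat) (word : List Char) (length : Int) : List (List Char) :=
  match fuel with
  | 0 => [word]
  | fuel + 1 =>
    if length < PySem.Chars.len word then
      (PySem.List.slice word none (some (length - 1)) ++ ['-']) ::
        pyHyphenate fuel (PySem.List.slice word (some (length - 1)) none) length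
    else [word]

-- the body of A's `for word in words` loop, state = (lines, curr_line)
def pyStep (max_line_length : Int) (st : List (List Char) × List Char) (word : List Char) :
    List (List Char) × List Char :=
  let (lines, curr) := st
  if max_line_length < PySem.Chars.len (curr ++ word) then
    let l := max_line_length - PySem.Chars.len curr
    let w := PySem.List.slice word none (some (l - 1)) ++ ['-']
    let curr2 := curr ++ w
    let lines2 := lines ++ [curr2]
    let hwords := pyHyphenate word.length (PySem.List.slice word (some (l - 1)) none) max_line_length
    -- hwords[:-1] appended to lines; curr_line = hwords[-1] (hwords is never [], so the
    -- `.getD []` default of the pyGet? read is never used)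
    (lines2 ++ PySem.List.slice hwords none (some (-1)),
     (PySem.List.pyGet? hwords (-1)).getD [])
  else
    (lines, curr ++ word ++ [' '])

def compute_lines (text : String) (max_line_length : Int) : List String :=
  let words := PySem.Chars.splitOn text.toList [' ']
  let res := words.foldl (pyStep max_line_length) ([], [])
  (if res.2 ≠ [] then res.1 ++ [PySem.Chars.strip res.2] else res.1).map String.ofList

-- ===== PORT B =====
-- the inner `while len(rest) > max_line_length:` loop of Source B; fuel bounds the iteration
-- count (each pass drops max_line_length-1 ≥ 1 chars when max_line_length ≥ 2)
def altEmit (fuel : Nat) (max_line_length : Int) (lines : List (List Char)) (rest : List Char) :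
    List (List Char) × List Char :=
  match fuel with
  | 0 => (lines, rest)
  | fuel + 1 =>
    if max_line_length < PySem.Chars.len rest then
      altEmit fuel max_line_length
        (lines ++ [PySem.List.slice rest none (some (max_line_length - 1)) ++ ['-']])
        (PySem.List.slice rest (some (max_line_length - 1)) none)
    else (lines, rest)

-- the body of Source B's word loop, state = (lines, curr)
def altStep (max_line_length : Int) (st : List (List Char) × List Char) (word : List Char) :
    List (List Char) × List Char :=
  let (lines, curr) := st
  if PySem.Chars.len curr + PySem.Chars.len word ≤ max_line_length then
    (lines, curr ++ word ++ [' '])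
  else
    let cut := max_line_length - PySem.Chars.len curr - 1
    altEmit word.length max_line_length
      (lines ++ [curr ++ PySem.List.slice word none (some cut) ++ ['-']])
      (PySem.List.slice word (some cut) none)

def compute_lines_alt (text : String) (max_line_length : Int) : List String :=
  let words := PySem.Chars.splitOn text.toList [' ']
  let res := words.foldl (altStep max_line_length) ([], [])
  (if res.2 ≠ [] then res.1 ++ [PySem.Chars.strip res.2] else res.1).map String.ofList

-- ===== PRECONDITION & SPEC =====
-- Pre_ excludes the max_line_length ≤ 1 inputs on which a word longer than max_line_length
-- must be hyphenated: there hyphenation cannot shrink its argument, so the Python A hits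
-- RecursionError (and B's while-loop spins) on most of them; on the few such inputs where A
-- still returns (a space before the long word leaves a negative cut, e.g. (" ab", 1)) B
-- returns the same value — see the cite in claim.json.
def Pre_compute_lines (text : String) (max_line_length : Int) : Prop :=
  2 ≤ max_line_length ∨
    (0 ≤ max_line_length ∧
      ∀ w ∈ PySem.Chars.splitOn text.toList [' '], (w.length : Int) ≤ max_line_length)
instance (text : String) (max_line_length : Int) : Decidable (Pre_compute_lines text max_line_length) := by unfold Pre_compute_lines; infer_instance

def pvWitness_compute_lines : String × Int := ("hello wide world", 5)

def Spec_compute_lines (text : String) (max_line_length : Int) (out : List String) : Prop := out = compute_lines_alt text max_line_length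
instance (text : String) (max_line_length : Int) (out : List String) : Decidable (Spec_compute_lines text max_line_length out) := by unfold Spec_compute_lines; infer_instance

-- ===== CLAIM (what is proved, stated in full; the proofs are below) =====
def Claim_equal_compute_lines : Prop := ∀ (text : String) (max_line_length : Int), Dom_compute_lines text max_line_length → Pre_compute_lines text max_line_length → Spec_compute_lines text max_line_length (compute_lines text max_line_length)

-- ===== LEMMAS AND PROOFS =====

theorem pyHyphenate_ne_nil (fuel : Nat) (word : List Char) (length : Int) :
    pyHyphenate fuel word length ≠ [] := by
  cases fuel with
  | zero => simp [pyHyphenate]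
  | succ n => unfold pyHyphenate; split <;> simp

theorem pyGet?_neg_one_getD {α : Type} (xs : List α) (d : α) (h : xs ≠ []) :
    (PySem.List.pyGet? xs (-1)).getD d = xs.getLast h := by
  have hlen : 0 < xs.length := List.length_pos_iff.mpr h
  simp only [PySem.List.pyGet?, PySem.List.pyIdx?]
  norm_num
  rw [if_pos (by omega : 1 ≤ xs.length)]
  simp [List.getElem?_eq_getElem (show xs.length - 1 < xs.length by omega),
        List.getLast_eq_getElem]

-- the inner while-loop of B emits exactly hwords[:-1] and leaves hwords[-1] as curr
theorem altEmit_eq_hyphenate (fuel : Nat) (m : Int) (lines : List (List Char)) (rest : List Char) :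
    altEmit fuel m lines rest =
      (lines ++ (pyHyphenate fuel rest m).dropLast,
       (PySem.List.pyGet? (pyHyphenate fuel rest m) (-1)).getD []) := by
  induction fuel generalizing lines rest with
  | zero =>
      simp [altEmit, pyHyphenate, pyGet?_neg_one_getD [rest] [] (by simp)]
  | succ n ih =>
      unfold altEmit pyHyphenate
      split
      · rw [ih]
        have hne := pyHyphenate_ne_nil n (PySem.List.slice rest (some (m - 1)) none) m
        rw [Prod.mk.injEq]
        refine ⟨by rw [List.dropLast_cons_of_ne_nil hne]; simp, ?_⟩
        rw [pyGet?_neg_one_getD _ [] hne,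
            pyGet?_neg_one_getD _ [] (List.cons_ne_nil _ _)]
        exact (List.getLast_cons hne).symm
      · simp [pyGet?_neg_one_getD [rest] [] (by simp)]

-- the two loop bodies agree on every state and word
theorem step_eq (m : Int) (st : List (List Char) × List Char) (word : List Char) :
    pyStep m st word = altStep m st word := by
  obtain ⟨lines, curr⟩ := st
  unfold pyStep altStep
  simp only [PySem.Chars.len_eq, List.length_append]
  by_cases h : (curr.length : Int) + (word.length : Int) ≤ m
  · rw [if_neg (by push_cast; omega), if_pos h]
  · rw [if_pos (by push_cast; omega), if_neg h]
    rw [altEmit_eq_hyphenate, PySem.List.slice_to_neg_one]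
    simp [List.append_assoc]

-- ===== VERDICT (by name: the statement is the Claim_ definition above) =====
theorem compute_lines_spec : Claim_equal_compute_lines := by
  intro text m _ _
  unfold Spec_compute_lines compute_lines compute_lines_alt
  have : pyStep m = altStep m := funext fun st => funext fun w => step_eq m st w
  rw [this]
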